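-- pv_equiv track=rewrite | github.com/emiliewz/leetcode | HashTable/1477.py | minSumOfLengths
-- ===== SOURCE A (Python) =====
-- from typing import List
--
-- def minSumOfLengths(arr: List[int], target: int) -> int:
--     a = {0: -1}
--     total, res = 0, float("inf")
--     candidates = [(-1, float("inf"))]
--     for i, n in enumerate(arr):
--         total += n
--         if total - target in a:
--             j = a[total - target]
--             cur = i - j
--             for ends, prev in candidates[::-1]:
--                 if ends <= j:
--                     if cur + prev < res:
--                         res = prev + cur
--                     break
--             if cur < candidates[-1][-1]:
--                 candidates.append((i, cur))
--         a[total] = i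
--     return res if res != float("inf") else -1
-- ===== SOURCE B (Python) =====
-- from typing import List
--
-- def minSumOfLengths(arr: List[int], target: int) -> int:
--     # prefix-sum hashmap + running "best length ending at index <= i" array,
--     # replacing A's candidates list and backward scan with an O(1) lookup
--     seen = {0: -1}
--     best = []          # best[i]: min length of a target-sum subarray ending at index <= i (None if none)
--     total = 0
--     res = None
--     cur_best = None
--     for i, x in enumerate(arr):
--         total += x
--         if total - target in seen:
--             j = seen[total - target]
--             cur = i - j
--             if j >= 0 and best[j] is not None:
--                 cand = cur + best[j]
--                 if res is None or cand < res:
--                     res = cand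
--             if cur_best is None or cur < cur_best:
--                 cur_best = cur
--         best.append(cur_best)
--         seen[total] = i
--     return res if res is not None else -1
-- ===== Notes on version B (the rewrite author's own statement) =====
-- stated objective: alternative
-- what changed: Replaces A's candidates list with backward linear rescans by a best-length-ending-at-or-before-i array, so each match is resolved by one O(1) indexed lookup instead of scanning candidates in reverse.
import Mathlib
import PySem

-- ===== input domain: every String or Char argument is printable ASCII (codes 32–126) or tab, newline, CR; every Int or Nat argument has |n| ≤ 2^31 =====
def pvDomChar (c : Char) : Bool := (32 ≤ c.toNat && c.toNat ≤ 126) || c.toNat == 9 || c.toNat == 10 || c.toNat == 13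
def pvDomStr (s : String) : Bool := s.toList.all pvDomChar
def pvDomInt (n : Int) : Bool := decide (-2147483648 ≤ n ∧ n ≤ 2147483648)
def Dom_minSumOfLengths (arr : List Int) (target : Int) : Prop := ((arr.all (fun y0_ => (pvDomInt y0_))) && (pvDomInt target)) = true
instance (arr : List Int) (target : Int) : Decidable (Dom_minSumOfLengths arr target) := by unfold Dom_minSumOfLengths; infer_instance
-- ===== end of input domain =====

-- B replaces A's candidates list + backward scan by a best-length-so-far array with direct indexing; return values proved equal on all inputs.
-- Python's float("inf") appears only as a sentinel larger than any int; both ports model it exactly as `none` in `Option Int`.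

-- ===== PORT A =====
-- x < y with none = +infinity
def pvLtInf : Option Int → Option Int → Bool
  | none, _ => false
  | some _, none => true
  | some x, some y => decide (x < y)

-- cur + prev with none = +infinity
def pvAddInf (c : Int) : Option Int → Option Int
  | none => none
  | some p => some (c + p)

-- candidates[-1][-1]  (candidates is never empty in A; the [] case is unreachable)
def pvLastPrev : List (Int × Option Int) → Option Int
  | [] => none
  | [(_, p)] => p
  | _ :: q :: rest => pvLastPrev (q :: rest)

-- the `for ends, prev in candidates[::-1]` loop (caller passes candidates.reverse)
def pvScan (cs : List (Int × Option Int)) (j cur : Int) (res : Option Int) : Option Int :=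
  match cs with
  | [] => res
  | (ends, prev) :: rest =>
    if ends ≤ j then
      if pvLtInf (pvAddInf cur prev) res then pvAddInf cur prev else res
    else pvScan rest j cur res

def pvGoA (target : Int) : List Int → Int → PySem.Dict Int Int → Int → Option Int → List (Int × Option Int) → Option Int
  | [], _, _, _, res, _ => res
  | n :: rest, i, a, total, res, cands =>
    let total' := total + n
    match a.get? (total' - target) with
    | some j =>
      let cur := i - j
      let res' := pvScan cands.reverse j cur res
      let cands' := if pvLtInf (some cur) (pvLastPrev cands) then cands ++ [(i, some cur)] else cands
      pvGoA target rest (i + 1) (a.insert total' i) total' res' cands'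
    | none =>
      pvGoA target rest (i + 1) (a.insert total' i) total' res cands

def minSumOfLengths (arr : List Int) (target : Int) : Int :=
  match pvGoA target arr 0 (PySem.Dict.empty.insert 0 (-1)) 0 none [(-1, none)] with
  | some r => r
  | none => -1

-- ===== PORT B =====
def pvGoB (target : Int) : List Int → Int → PySem.Dict Int Int → Int → Option Int → List (Option Int) → Option Int → Option Int
  | [], _, _, _, res, _, _ => res
  | x :: rest, i, seen, total, res, best, curBest =>
    let total' := total + x
    match seen.get? (total' - target) with
    | some j =>
      let cur := i - j
      let res' :=
        if 0 ≤ j then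
          match best[j.toNat]? with   -- best[j]: 0 ≤ j < len(best) always holds here
          | some (some bj) =>
            if (match res with | none => true | some r => decide (cur + bj < r)) then some (cur + bj) else res
          | _ => res
        else res
      let curBest' := if (match curBest with | none => true | some c => decide (cur < c)) then some cur else curBest
      pvGoB target rest (i + 1) (seen.insert total' i) total' res' (best ++ [curBest']) curBest'
    | none =>
      pvGoB target rest (i + 1) (seen.insert total' i) total' res (best ++ [curBest]) curBest

def minSumOfLengths_alt (arr : List Int) (target : Int) : Int :=
  match pvGoB target arr 0 (PySem.Dict.empty.insert 0 (-1)) 0 none [] none with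
  | some r => r
  | none => -1

-- ===== PRECONDITION & SPEC =====
def Spec_minSumOfLengths (arr : List Int) (target : Int) (out : Int) : Prop := out = minSumOfLengths_alt arr target
instance (arr : List Int) (target : Int) (out : Int) : Decidable (Spec_minSumOfLengths arr target out) := by unfold Spec_minSumOfLengths; infer_instance

-- ===== CLAIM (what is proved, stated in full; the proofs are below) =====
def Claim_equal_minSumOfLengths : Prop := ∀ (arr : List Int) (target : Int), Dom_minSumOfLengths arr target → Spec_minSumOfLengths arr target (minSumOfLengths arr target)

-- ===== LEMMAS AND PROOFS =====

-- prev of the first candidate (in the given order) with ends ≤ j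
def pvFind (cs : List (Int × Option Int)) (j : Int) : Option (Option Int) :=
  match cs with
  | [] => none
  | (ends, prev) :: rest => if ends ≤ j then some prev else pvFind rest j

lemma pvScan_eq_pvFind (cs : List (Int × Option Int)) (j cur : Int) (res : Option Int) :
    pvScan cs j cur res =
      match pvFind cs j with
      | none => res
      | some prev => if pvLtInf (pvAddInf cur prev) res then pvAddInf cur prev else res := by
  induction cs with
  | nil => rfl
  | cons p rest ih =>
    obtain ⟨e, pr⟩ := p
    by_cases h : e ≤ j
    · simp [pvScan, pvFind, h]
    · simp [pvScan, pvFind, h, ih]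

lemma pvLastPrev_append_singleton (l : List (Int × Option Int)) (x : Int × Option Int) :
    pvLastPrev (l ++ [x]) = x.2 := by
  induction l with
  | nil => rfl
  | cons p rest ih =>
    cases rest with
    | nil => simp [pvLastPrev]
    | cons q t => simpa [pvLastPrev] using ih

-- B's best-value at a possibly-negative index (none for j = -1)
def pvBestAt (best : List (Option Int)) (j : Int) : Option Int :=
  if j < 0 then none else (best[j.toNat]?).join

def InvAB (i : Int) (a : PySem.Dict Int Int) (cands : List (Int × Option Int))
    (best : List (Option Int)) (curBest : Option Int) : Prop :=
  0 ≤ i ∧ best.length = i.toNat ∧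
  (∀ k v, a.get? k = some v → -1 ≤ v ∧ v < i) ∧
  (∀ j : Int, -1 ≤ j → pvFind cands.reverse j = some (if j < i then pvBestAt best j else curBest)) ∧
  (∀ p ∈ cands, p.1 < i) ∧
  cands ≠ [] ∧ pvLastPrev cands = curBest

lemma pvBestAt_append (best : List (Option Int)) (c : Option Int) (j : Int) (hj : j < (best.length : Int)) :
    pvBestAt (best ++ [c]) j = pvBestAt best j := by
  unfold pvBestAt
  split_ifs with h
  · rfl
  · have : j.toNat < best.length := by omega
    rw [List.getElem?_append_left this]

lemma InvAB_go (target : Int) (xs : List Int) : ∀ (i : Int) (a : PySem.Dict Int Int) (total : Int)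
    (res : Option Int) (cands : List (Int × Option Int)) (best : List (Option Int)) (curBest : Option Int),
    InvAB i a cands best curBest →
    pvGoA target xs i a total res cands = pvGoB target xs i a total res best curBest := by
  induction xs with
  | nil => intro _ _ _ _ _ _ _ _; rfl
  | cons n rest ih =>
    intro i a total res cands best curBest hInv
    obtain ⟨hi0, hlen, hdict, hfind, hends, hne, hlast⟩ := hInv
    simp only [pvGoA, pvGoB]
    -- the dict lookup is shared state; case on it
    cases hj : a.get? (total + n - target) with
    | none =>
      -- no match: states stay aligned
      apply ih
      refine ⟨by omega, by simp [hlen]; omega, ?_, ?_, ?_, hne, hlast⟩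
      · intro k v hv
        rw [PySem.Dict.get?_insert] at hv
        split at hv
        · cases hv; omega
        · have := hdict k v hv; omega
      · intro j hjm
        rw [hfind j hjm]
        congr 1
        by_cases h1 : j < i
        · rw [if_pos h1, if_pos (show j < i + 1 by omega), pvBestAt_append best curBest j (by omega)]
        · by_cases h2 : j < i + 1
          · rw [if_neg h1, if_pos h2]
            unfold pvBestAt
            rw [if_neg (by omega)]
            have ht : j.toNat = best.length := by omega
            simp [ht]
          · rw [if_neg h1, if_neg h2]
      · intro p hp; have := hends p hp; omega
    | some j =>
      -- j is a stored index, so -1 ≤ j < i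
      have hjb : -1 ≤ j ∧ j < i := hdict _ _ hj
      have hfj := hfind j hjb.1
      rw [if_pos hjb.2] at hfj
      have hins : ∀ k v, (a.insert (total + n) i).get? k = some v → -1 ≤ v ∧ v < i + 1 := by
        intro k v hv
        rw [PySem.Dict.get?_insert] at hv
        split at hv
        · cases hv; omega
        · have := hdict k v hv; omega
      -- the find-invariant after appending a candidate (i, c) and best-cell c
      have hfb : ∀ (c : Option Int), ∀ j' : Int, -1 ≤ j' →
          pvFind ((cands ++ [(i, c)]).reverse) j' = some (if j' < i + 1 then pvBestAt (best ++ [c]) j' else c) := by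
        intro c j' hj'
        rw [List.reverse_append]
        simp only [List.reverse_singleton, List.singleton_append, pvFind]
        by_cases hle : i ≤ j'
        · rw [if_pos hle]
          by_cases h2 : j' < i + 1
          · have he : j' = i := by omega
            subst he
            rw [if_pos h2]
            unfold pvBestAt
            rw [if_neg (by omega)]
            have ht : j'.toNat = best.length := by omega
            simp [ht]
          · rw [if_neg h2]
        · rw [if_neg hle, hfind j' hj', if_pos (by omega), if_pos (by omega),
            pvBestAt_append best c j' (by omega)]
      -- the find-invariant without appending a candidate (best-cell stays curBest)
      have hfn : ∀ j' : Int, -1 ≤ j' →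
          pvFind cands.reverse j' = some (if j' < i + 1 then pvBestAt (best ++ [curBest]) j' else curBest) := by
        intro j' hj'
        rw [hfind j' hj']
        congr 1
        by_cases h1 : j' < i
        · rw [if_pos h1, if_pos (show j' < i + 1 by omega), pvBestAt_append best curBest j' (by omega)]
        · by_cases h2 : j' < i + 1
          · rw [if_neg h1, if_pos h2]
            unfold pvBestAt
            rw [if_neg (by omega)]
            have ht : j'.toNat = best.length := by omega
            simp [ht]
          · rw [if_neg h1, if_neg h2]
      have hinvA : InvAB (i + 1) (a.insert (total + n) i) (cands ++ [(i, some (i - j))])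
          (best ++ [some (i - j)]) (some (i - j)) := by
        refine ⟨by omega, by simp [hlen]; omega, hins, hfb _, ?_, by simp, by rw [pvLastPrev_append_singleton]⟩
        intro p hp
        rcases List.mem_append.mp hp with h | h
        · have := hends p h; omega
        · simp only [List.mem_singleton] at h
          subst h
          show i < i + 1
          omega
      have hinvN : InvAB (i + 1) (a.insert (total + n) i) cands (best ++ [curBest]) curBest :=
        ⟨by omega, by simp [hlen]; omega, hins, hfn, by intro p hp; have := hends p hp; omega, hne, hlast⟩
      -- reduce A's backward scan via the invariant, then case-split until both sides coincide
      simp only [pvScan_eq_pvFind, hfj, hlast]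
      have hbeq : pvBestAt best j = (if 0 ≤ j then (best[j.toNat]?).join else none) := by
        unfold pvBestAt
        by_cases h0 : 0 ≤ j
        · rw [if_neg (by omega), if_pos h0]
        · rw [if_pos (by omega), if_neg h0]
      by_cases h0 : 0 ≤ j
      · have hjlt : j.toNat < best.length := by omega
        have hbj : best[j.toNat]? = some best[j.toNat] := List.getElem?_eq_getElem hjlt
        rw [hbeq, if_pos h0, hbj]
        cases hbv : best[j.toNat] with
        | none =>
          rcases curBest with _ | cb
          · simp only [Option.join_some, pvAddInf, if_pos h0]
            simp [pvLtInf]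
            exact ih _ _ _ _ _ _ _ hinvA
          · simp only [Option.join_some, pvAddInf, if_pos h0]
            by_cases hlt : i - j < cb
            · simp [pvLtInf, hlt]
              exact ih _ _ _ _ _ _ _ hinvA
            · simp [pvLtInf, hlt]
              exact ih _ _ _ _ _ _ _ hinvN
        | some bj =>
          simp only [Option.join_some, pvAddInf, if_pos h0]
          rcases curBest with _ | cb
          · simp [pvLtInf]
            cases res <;> exact ih _ _ _ _ _ _ _ hinvA
          · by_cases hlt : i - j < cb
            · simp [pvLtInf, hlt]
              cases res <;> exact ih _ _ _ _ _ _ _ hinvA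
            · simp [pvLtInf, hlt]
              cases res <;> exact ih _ _ _ _ _ _ _ hinvN
      · -- j = -1 : neither side updates res
        rw [hbeq, if_neg h0]
        rcases curBest with _ | cb
        · simp only [pvAddInf, if_neg h0]
          simp [pvLtInf]
          exact ih _ _ _ _ _ _ _ hinvA
        · simp only [pvAddInf, if_neg h0]
          by_cases hlt : i - j < cb
          · simp [pvLtInf, hlt]
            exact ih _ _ _ _ _ _ _ hinvA
          · simp [pvLtInf, hlt]
            exact ih _ _ _ _ _ _ _ hinvN

-- ===== VERDICT (by name: the statement is the Claim_ definition above) =====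
theorem minSumOfLengths_spec : Claim_equal_minSumOfLengths := by
  intro arr target _
  unfold Spec_minSumOfLengths minSumOfLengths minSumOfLengths_alt
  rw [InvAB_go target arr 0 _ 0 none [(-1, none)] [] none ?_]
  refine ⟨le_refl 0, rfl, ?_, ?_, ?_, by simp, rfl⟩
  · intro k v hv
    rw [PySem.Dict.get?_insert] at hv
    split at hv
    · cases hv; omega
    · simp [PySem.Dict.get?_empty] at hv
  · intro j hj
    simp only [List.reverse_singleton, pvFind]
    rw [if_pos hj]
    by_cases h : j < 0
    · rw [if_pos h]; unfold pvBestAt; rw [if_pos h]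
    · rw [if_neg h]
  · intro p hp; simp at hp; subst hp; simp
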